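-- pv_equiv track=rewrite | github.com/SphRbtHyk/ScriptioContinuaSegmenter | src/sc_segmenter/training/ground_truth_annotator.py | annotate_dict
-- ===== SOURCE A (Python) =====
-- def binary_annotation(input_string: str) -> list[str]:
--     """Perform the binary annotation of a string, and returns
--     the corresponding labels for the training of the segmentation
--     model:
--         - If a character is followed by a white space, then add the "E"
--         (End of Word) tag.
--         - Otherwise, add a "I" (Inside) tag.
--
--     Args:
--         input_string (str): The string to use as ground truth to
--             build the labels.
--
--     Returns:
--         annotations (list[str]): The labels to use for training
--             the model.
--     """
--     annotations = []
--     for word in input_string.split():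
--         annotations.extend(["I"] *
--                            (len(word) - 1) + ["E"])
--     return annotations
--
-- def quadrimodal_annotation(input_string: str) -> list[str]:
--     """Perform a quadrimodal annotation of a string, and returns
--     the corresponding labels for the training of the segmentation
--     model:
--         - B if the character is the beginning of a word.
--         - I if the character is inside the word.
--         - E if the character is at the end of the word.
--         - S if the character is a single one.
--
--     Args:
--         input_string (str): The string to use as ground truth to
--             build the labels.
--
--     Returns:
--         annotations (list[str]): The labels to use for training
--             the model.
--     """
--     annotations = []
--     for word in input_string.split():
--         # Check if the length of the word is 1
--         if len(word) == 1:
--             annotations.extend("S")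
--         else:
--             annotations.extend(["B"] + ["I"] *
--                                (len(word) - 2) + ["E"])
--     return annotations
--
-- def annotate_dict(input_dict: dict[str, dict[str, dict[str, str]]],
--                   annotation_scheme: str = "binary") -> \
--         list[tuple[str, list[str], str]]:
--     """Perform the annotation of an input dictionary.
--
--     Args:
--         input_dict (dict[str, dict[str, dict[str, str]]]): The input
--             dictionary to annotate. It must be a nested dictionary,
--             of the form book_name/chap/verse.
--
--     Returns:
--         list[tuple[str, list[str]]]: The list of the strings, their
--             annotations as a list of tuple and the corresponding ground truth.
--             The spaces will be removed as they are indicated in the label.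
--     """
--     if annotation_scheme == "binary":
--         annotation_fun = binary_annotation
--     elif annotation_scheme == "quadrimodal":
--         annotation_fun = quadrimodal_annotation
--     else:
--         raise ValueError("Unknown required annotation mode"
--                          f"{annotation_scheme}")
--     annotations = []
--     for _, book_content in input_dict.items():
--         for _, chapter_content in book_content.items():
--             for _, verse_content in chapter_content.items():
--                 annotations.append((
--                     verse_content.replace(" ", "").lower(),
--                     annotation_fun(verse_content),
--                     verse_content)
--                 )
--     return annotations
-- ===== SOURCE B (Python) =====
-- def annotate_dict(input_dict, annotation_scheme="binary"):
--     if annotation_scheme not in ("binary", "quadrimodal"):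
--         raise ValueError("Unknown required annotation mode"
--                          f"{annotation_scheme}")
--     quad = annotation_scheme == "quadrimodal"
--     annotations = []
--     for book_content in input_dict.values():
--         for chapter_content in book_content.values():
--             for verse in chapter_content.values():
--                 labels = []
--                 at_start = True
--                 # single lookahead scan: pair each char with its successor
--                 # (a space sentinel marks the end of the string)
--                 for c, nxt in zip(verse, list(verse[1:]) + [" "]):
--                     if c.isspace():
--                         at_start = True
--                         continue
--                     at_end = nxt.isspace()
--                     if quad:
--                         labels.append("S" if at_start and at_end
--                                       else "B" if at_start
--                                       else "E" if at_end else "I")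
--                     else:
--                         labels.append("E" if at_end else "I")
--                     at_start = False
--                 annotations.append((verse.replace(" ", "").lower(), labels, verse))
--     return annotations
-- ===== Notes on version B (the rewrite author's own statement) =====
-- stated objective: alternative
-- what changed: The annotation helpers that split the verse into words and emit per-word label blocks are replaced by a single left-to-right character scan with one-character lookahead (zip of the string with its shifted self) that labels each non-space character from at_start/at_end flags.
import Mathlib
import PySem

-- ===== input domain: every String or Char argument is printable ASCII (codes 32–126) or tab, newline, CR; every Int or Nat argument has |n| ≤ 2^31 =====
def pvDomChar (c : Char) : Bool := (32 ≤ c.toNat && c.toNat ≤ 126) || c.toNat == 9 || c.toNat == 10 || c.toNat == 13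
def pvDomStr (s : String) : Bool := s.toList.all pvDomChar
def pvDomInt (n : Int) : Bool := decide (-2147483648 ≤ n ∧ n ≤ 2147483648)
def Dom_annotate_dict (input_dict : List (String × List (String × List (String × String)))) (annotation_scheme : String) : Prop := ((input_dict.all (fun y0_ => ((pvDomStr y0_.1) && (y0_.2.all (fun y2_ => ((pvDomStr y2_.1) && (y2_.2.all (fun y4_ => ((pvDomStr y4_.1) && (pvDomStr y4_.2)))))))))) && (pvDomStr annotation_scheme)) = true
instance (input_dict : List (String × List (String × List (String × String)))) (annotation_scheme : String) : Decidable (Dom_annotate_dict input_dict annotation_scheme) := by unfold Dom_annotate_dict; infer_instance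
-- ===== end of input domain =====

-- B replaces the split-into-words annotation helpers by a single lookahead character scan; same triple loop over the nested dicts.

-- ===== PORT A =====
def binary_annotation (input_string : String) : List String :=
  (PySem.Str.split₀ input_string).foldl
    (fun annotations word =>
      annotations ++ (List.replicate ((PySem.Str.len word) - 1).toNat "I" ++ ["E"])) []

def quadrimodal_annotation (input_string : String) : List String :=
  (PySem.Str.split₀ input_string).foldl
    (fun annotations word =>
      if PySem.Str.len word == 1 then annotations ++ ["S"]
      else annotations ++ (["B"] ++ List.replicate ((PySem.Str.len word) - 2).toNat "I" ++ ["E"])) []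

def annotateLoop (annotation_fun : String → List String)
    (input_dict : List (String × List (String × List (String × String)))) :
    List (String × List String × String) :=
  input_dict.foldl (fun annotations book =>
    book.2.foldl (fun annotations chapter =>
      chapter.2.foldl (fun annotations verse =>
        annotations ++ [(PySem.Str.lower (PySem.Str.replace verse.2 " " ""),
                         annotation_fun verse.2, verse.2)]) annotations) annotations) []

def annotate_dict (input_dict : List (String × List (String × List (String × String)))) (annotation_scheme : String) : List (String × List String × String) :=
  if annotation_scheme == "binary" then annotateLoop binary_annotation input_dict
  else if annotation_scheme == "quadrimodal" then annotateLoop quadrimodal_annotation input_dict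
  else []  -- Python raises ValueError here; excluded by Pre_

-- ===== PORT B =====
-- lookahead scan: fold over (char, successor) pairs carrying (at_start, labels)
def scanVerse (quad : Bool) (verse : String) : List String :=
  let cs := verse.toList
  ((cs.zip (cs.drop 1 ++ [' '])).foldl
    (fun st p =>
      if PySem.Chars.isspace p.1 then (true, st.2)
      else
        let at_end := PySem.Chars.isspace p.2
        (false, st.2 ++ [if quad then
            (if st.1 && at_end then "S" else if st.1 then "B"
             else if at_end then "E" else "I")
          else (if at_end then "E" else "I")]))
    (true, ([] : List String))).2

def annotate_dict_alt (input_dict : List (String × List (String × List (String × String)))) (annotation_scheme : String) : List (String × List String × String) :=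
  if !(annotation_scheme == "binary" || annotation_scheme == "quadrimodal") then []  -- Python raises ValueError; excluded by Pre_
  else
    let quad := annotation_scheme == "quadrimodal"
    input_dict.foldl (fun annotations book =>
      book.2.foldl (fun annotations chapter =>
        chapter.2.foldl (fun annotations verse =>
          annotations ++ [(PySem.Str.lower (PySem.Str.replace verse.2 " " ""),
                           scanVerse quad verse.2, verse.2)]) annotations) annotations) []

-- ===== PRECONDITION & SPEC =====
-- Pre_ excludes exactly the schemes on which the Python A raises ValueError (B raises too).
def Pre_annotate_dict (input_dict : List (String × List (String × List (String × String)))) (annotation_scheme : String) : Prop :=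
  annotation_scheme = "binary" ∨ annotation_scheme = "quadrimodal"
instance (input_dict : List (String × List (String × List (String × String)))) (annotation_scheme : String) : Decidable (Pre_annotate_dict input_dict annotation_scheme) := by unfold Pre_annotate_dict; infer_instance
def pvWitness_annotate_dict : (List (String × List (String × List (String × String)))) × String :=
  ([("b", [("1", [("1", "ab c  d"), ("2", "x")])])], "quadrimodal")

def Spec_annotate_dict (input_dict : List (String × List (String × List (String × String)))) (annotation_scheme : String) (out : List (String × List String × String)) : Prop := out = annotate_dict_alt input_dict annotation_scheme
instance (input_dict : List (String × List (String × List (String × String)))) (annotation_scheme : String) (out : List (String × List String × String)) : Decidable (Spec_annotate_dict input_dict annotation_scheme out) := by unfold Spec_annotate_dict; infer_instance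

-- ===== CLAIM (what is proved, stated in full; the proofs are below) =====
def Claim_equal_annotate_dict : Prop := ∀ (input_dict : List (String × List (String × List (String × String)))) (annotation_scheme : String), Dom_annotate_dict input_dict annotation_scheme → Pre_annotate_dict input_dict annotation_scheme → Spec_annotate_dict input_dict annotation_scheme (annotate_dict input_dict annotation_scheme)

-- ===== LEMMAS AND PROOFS =====

-- proof-side cons-recursion form of B's scan
def scanChars (quad : Bool) : Bool → List Char → List String
  | _, [] => []
  | atStart, c :: rest =>
    if PySem.Chars.isspace c then scanChars quad true rest
    else
      let atEnd := match rest with | [] => true | d :: _ => PySem.Chars.isspace d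
      (if quad then
         (if atStart && atEnd then "S" else if atStart then "B"
          else if atEnd then "E" else "I")
       else (if atEnd then "E" else "I")) :: scanChars quad false rest

-- per-word label block as A emits it, as a function of the word length
def wordLab (quad : Bool) (n : Nat) : List String :=
  if quad then (if n == 1 then ["S"] else ["B"] ++ List.replicate (n - 2) "I" ++ ["E"])
  else List.replicate (n - 1) "I" ++ ["E"]

-- labels for the suffix of a word already entered (atStart = false)
def midLab (n : Nat) : List String :=
  if n == 0 then [] else List.replicate (n - 1) "I" ++ ["E"]

lemma zipfold_eq (quad : Bool) : ∀ (cs : List Char) (atStart : Bool) (labels : List String),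
    ((cs.zip (cs.drop 1 ++ [' '])).foldl
      (fun st p =>
        if PySem.Chars.isspace p.1 then (true, st.2)
        else
          let at_end := PySem.Chars.isspace p.2
          (false, st.2 ++ [if quad then
              (if st.1 && at_end then "S" else if st.1 then "B"
               else if at_end then "E" else "I")
            else (if at_end then "E" else "I")]))
      (atStart, labels)).2 = labels ++ scanChars quad atStart cs := by
  intro cs
  induction cs with
  | nil => intro atStart labels; simp [scanChars]
  | cons c t ih =>
    intro atStart labels
    cases t with
    | nil =>
      have hsp : PySem.Chars.isspace ' ' = true := by decide
      by_cases h : PySem.Chars.isspace c = true <;>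
        cases atStart <;> simp [scanChars, h, hsp]
    | cons d t' =>
      have hz : (c :: d :: t').zip ((c :: d :: t').drop 1 ++ [' '])
          = (c, d) :: (d :: t').zip ((d :: t').drop 1 ++ [' ']) := by simp
      rw [hz]
      by_cases h : PySem.Chars.isspace c = true <;>
        simp only [List.foldl_cons, h, if_pos, if_neg, Bool.false_eq_true, not_false_iff, ite_true, ite_false] <;>
        rw [ih] <;> simp [scanChars, h]

lemma scanVerse_eq (quad : Bool) (s : String) :
    scanVerse quad s = scanChars quad true s.toList := by
  unfold scanVerse
  rw [zipfold_eq]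
  simp

-- structural facts about PySem.Chars.split₀
lemma go_acc : ∀ (rest cur : List Char) (acc : List (List Char)),
    PySem.Chars.split₀.go rest cur acc = acc.reverse ++ PySem.Chars.split₀.go rest cur [] := by
  intro rest
  induction rest with
  | nil =>
    intro cur acc
    simp only [PySem.Chars.split₀.go]
    by_cases h : cur.isEmpty = true <;> simp [h]
  | cons c t ih =>
    intro cur acc
    simp only [PySem.Chars.split₀.go]
    by_cases h : PySem.Chars.isspace c = true
    · by_cases hc : cur.isEmpty = true <;> simp only [h, hc, if_true, if_false, ite_true, ite_false]
      · exact ih [] acc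
      · rw [ih [] (cur.reverse :: acc), ih [] [cur.reverse]]; simp
    · simp only [h, if_false, ite_false, Bool.false_eq_true]
      exact ih (c :: cur) acc

lemma split₀_nil : PySem.Chars.split₀ [] = [] := rfl

lemma split₀_cons_space {c : Char} (h : PySem.Chars.isspace c = true) (cs : List Char) :
    PySem.Chars.split₀ (c :: cs) = PySem.Chars.split₀ cs := by
  simp [PySem.Chars.split₀, PySem.Chars.split₀.go, h]

lemma go_mid : ∀ (rest cur : List Char), cur ≠ [] →
    PySem.Chars.split₀.go rest cur []
      = (cur.reverse ++ rest.takeWhile (fun d => !PySem.Chars.isspace d))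
        :: PySem.Chars.split₀ (rest.dropWhile (fun d => !PySem.Chars.isspace d)) := by
  intro rest
  induction rest with
  | nil =>
    intro cur hcur
    simp [PySem.Chars.split₀.go, split₀_nil, List.isEmpty_eq_false_iff.mpr hcur]
  | cons c t ih =>
    intro cur hcur
    by_cases h : PySem.Chars.isspace c = true
    · rw [List.takeWhile_cons, List.dropWhile_cons]
      have h1 : PySem.Chars.split₀.go (c :: t) cur []
          = PySem.Chars.split₀.go t [] [cur.reverse] := by
        simp [PySem.Chars.split₀.go, h, List.isEmpty_eq_false_iff.mpr hcur]
      rw [h1, go_acc]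
      simp only [h, Bool.not_true, Bool.false_eq_true, ite_false, if_false]
      rw [split₀_cons_space h]
      simp [PySem.Chars.split₀]
    · simp only [PySem.Chars.split₀.go, h, Bool.false_eq_true, if_false, ite_false]
      rw [ih (c :: cur) (by simp), List.takeWhile_cons, List.dropWhile_cons]
      simp [h]

lemma split₀_cons_word {c : Char} (h : PySem.Chars.isspace c = false) (cs : List Char) :
    PySem.Chars.split₀ (c :: cs)
      = (c :: cs.takeWhile (fun d => !PySem.Chars.isspace d))
        :: PySem.Chars.split₀ (cs.dropWhile (fun d => !PySem.Chars.isspace d)) := by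
  have : PySem.Chars.split₀ (c :: cs) = PySem.Chars.split₀.go cs [c] [] := by
    simp [PySem.Chars.split₀, PySem.Chars.split₀.go, h]
  rw [this, go_mid cs [c] (by simp)]
  simp

-- the mid-word scan emits I…IE for the rest of the current word
lemma scan_false_eq (quad : Bool) : ∀ (cs : List Char),
    scanChars quad false cs
      = midLab (cs.takeWhile (fun d => !PySem.Chars.isspace d)).length
        ++ scanChars quad true (cs.dropWhile (fun d => !PySem.Chars.isspace d)) := by
  intro cs
  induction cs with
  | nil => simp [scanChars, midLab]
  | cons c t ih =>
    by_cases h : PySem.Chars.isspace c = true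
    · rw [List.takeWhile_cons, List.dropWhile_cons]
      simp [scanChars, h, midLab]
    · rw [List.takeWhile_cons, List.dropWhile_cons]
      simp only [h, Bool.not_false, ite_true, if_true, Bool.false_eq_true]
      simp only [scanChars, h, Bool.false_eq_true, if_false, ite_false]
      rw [ih]
      cases t with
      | nil => simp [midLab]
      | cons d t' =>
        by_cases hd : PySem.Chars.isspace d = true
        · rw [List.takeWhile_cons]
          simp [hd, midLab]
        · rw [List.takeWhile_cons]
          simp only [hd, Bool.not_false, ite_true, List.length_cons, midLab]
          simp [List.replicate_succ, hd]

lemma scan_true_eq (quad : Bool) : ∀ (n : Nat) (cs : List Char), cs.length ≤ n →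
    scanChars quad true cs
      = (PySem.Chars.split₀ cs).flatMap (fun w => wordLab quad w.length) := by
  intro n
  induction n with
  | zero =>
    intro cs hlen
    have : cs = [] := List.eq_nil_of_length_eq_zero (Nat.le_zero.mp hlen)
    subst this; simp [scanChars, split₀_nil]
  | succ n ih =>
    intro cs hlen
    cases cs with
    | nil => simp [scanChars, split₀_nil]
    | cons c t =>
      by_cases h : PySem.Chars.isspace c = true
      · rw [split₀_cons_space h]
        simp only [scanChars, h, if_true, ite_true]
        exact ih t (by simpa using Nat.lt_succ_iff.mp (Nat.lt_of_lt_of_le (Nat.lt_succ_self _) (by simpa using hlen)))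
      · have h' := Bool.eq_false_iff.mpr h
        cases t with
        | nil =>
          rw [split₀_cons_word h']
          cases quad <;> simp [scanChars, h, wordLab, split₀_nil]
        | cons d t' =>
          by_cases hd : PySem.Chars.isspace d = true
          · rw [split₀_cons_word h', List.takeWhile_cons, List.dropWhile_cons]
            simp only [hd, Bool.not_true, Bool.false_eq_true, ite_false, if_false]
            rw [split₀_cons_space hd, List.flatMap_cons,
              ← ih t' (by simpa using Nat.le_of_succ_le (Nat.succ_le_succ_iff.mp hlen))]
            cases quad <;> simp [scanChars, h, hd, wordLab]
          · rw [scanChars]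
            simp only [h, Bool.false_eq_true, if_false, ite_false]
            rw [scan_false_eq quad (d :: t'), List.takeWhile_cons, List.dropWhile_cons]
            simp only [hd, Bool.not_false, ite_true, if_true]
            rw [ih (t'.dropWhile (fun e => !PySem.Chars.isspace e))
                (le_trans (List.length_dropWhile_le _ _)
                  (by simpa using Nat.le_of_succ_le (Nat.succ_le_succ_iff.mp hlen)))]
            rw [split₀_cons_word h', List.takeWhile_cons, List.dropWhile_cons]
            simp only [hd, Bool.not_false, ite_true, if_true, List.flatMap_cons, List.length_cons]
            generalize (List.takeWhile (fun e => !PySem.Chars.isspace e) t').length = m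
            cases quad <;> simp [wordLab, midLab, List.replicate_succ, hd]

lemma binary_eq_scan (s : String) : binary_annotation s = scanVerse false s := by
  rw [scanVerse_eq, scan_true_eq false s.toList.length s.toList le_rfl,
    ← PySem.Str.split₀_map_toList s, List.flatMap_map]
  unfold binary_annotation
  rw [PySem.List.foldl_append_eq_flatMap, List.nil_append]
  congr 1
  funext w
  rw [PySem.Str.len_eq]
  simp only [wordLab, Bool.false_eq_true, if_false, ite_false]
  have h1 : ((w.toList.length : Int) - 1).toNat = w.toList.length - 1 := by omega
  rw [h1]

lemma quadrimodal_eq_scan (s : String) : quadrimodal_annotation s = scanVerse true s := by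
  rw [scanVerse_eq, scan_true_eq true s.toList.length s.toList le_rfl,
    ← PySem.Str.split₀_map_toList s, List.flatMap_map]
  unfold quadrimodal_annotation
  rw [PySem.List.foldl_congr_mem _ _
    (fun annotations word =>
      annotations ++ (if PySem.Str.len word == 1 then ["S"]
        else ["B"] ++ List.replicate ((PySem.Str.len word) - 2).toNat "I" ++ ["E"])) []
    (by intro acc w _; simp only []; split_ifs <;> rfl)]
  rw [PySem.List.foldl_append_eq_flatMap, List.nil_append]
  congr 1
  funext w
  rw [PySem.Str.len_eq]
  simp only [wordLab, if_true, ite_true]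
  by_cases h1 : w.toList.length = 1
  · simp [h1]
  · have e1 : ((w.toList.length : Int) == 1) = false := by
      simp only [beq_iff_eq, beq_eq_false_iff_ne, ne_eq]
      omega
    have e2 : (w.toList.length == 1) = false := by
      simp only [beq_eq_false_iff_ne, ne_eq]
      exact h1
    rw [e1, e2]
    simp only [Bool.false_eq_true, if_false, ite_false]
    have h2 : ((w.toList.length : Int) - 2).toNat = w.toList.length - 2 := by omega
    rw [h2]

-- the triple loop only depends on the annotation function pointwise
lemma loop_eq (f : String → List String) (quad : Bool)
    (hf : ∀ s, f s = scanVerse quad s)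
    (input_dict : List (String × List (String × List (String × String)))) :
    annotateLoop f input_dict
      = input_dict.foldl (fun annotations book =>
          book.2.foldl (fun annotations chapter =>
            chapter.2.foldl (fun annotations verse =>
              annotations ++ [(PySem.Str.lower (PySem.Str.replace verse.2 " " ""),
                               scanVerse quad verse.2, verse.2)]) annotations) annotations) [] := by
  have : f = scanVerse quad := funext hf
  rw [annotateLoop, this]

-- ===== VERDICT (by name: the statement is the Claim_ definition above) =====
theorem annotate_dict_spec : Claim_equal_annotate_dict := by
  intro input_dict annotation_scheme _ hpre
  unfold Spec_annotate_dict
  rcases hpre with h | h <;> subst h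
  · rw [annotate_dict, annotate_dict_alt]
    simp only [beq_self_eq_true, if_true, ite_true, Bool.or_eq_true, Bool.not_true, String.reduceBEq]
    exact loop_eq binary_annotation false binary_eq_scan input_dict
  · rw [annotate_dict, annotate_dict_alt]
    simp only [beq_self_eq_true, if_true, ite_true, Bool.or_eq_true, Bool.not_true, String.reduceBEq]
    exact loop_eq quadrimodal_annotation true quadrimodal_eq_scan input_dict
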